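-- pv_equiv track=rewrite | github.com/teilomillet/kromcanon | src/kromcanon/data.py | pack_sequences
-- ===== SOURCE A (Python) =====
-- def pack_sequences(
--     token_ids: list[list[int]],
--     seq_len: int,
--     bos_token: int = 0,
-- ) -> list[list[int]]:
--     """Pack tokenized documents into fixed-length sequences with BOS alignment.
--
--     Concatenates documents separated by BOS tokens, then splits into
--     fixed-length chunks. Incomplete final chunk is discarded.
--
--     Args:
--         token_ids: List of tokenized documents (each is a list of int).
--         seq_len: Target sequence length.
--         bos_token: BOS token ID to insert between documents.
--
--     Returns:
--         List of packed sequences, each of length seq_len.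
--     """
--     # Concatenate all documents with BOS separators
--     flat: list[int] = []
--     for doc in token_ids:
--         flat.append(bos_token)
--         flat.extend(doc)
--
--     # Split into fixed-length chunks
--     n_sequences = len(flat) // seq_len
--     sequences: list[list[int]] = []
--     for i in range(n_sequences):
--         start = i * seq_len
--         sequences.append(flat[start : start + seq_len])
--
--     return sequences
-- ===== SOURCE B (Python) =====
-- def pack_sequences(
--     token_ids: list[list[int]],
--     seq_len: int,
--     bos_token: int = 0,
-- ) -> list[list[int]]:
--     """Streaming pack: maintain a sliding buffer, emit full chunks as they fill."""
--     if seq_len <= 0: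
--         return []
--     out: list[list[int]] = []
--     buffer: list[int] = []
--     for doc in token_ids:
--         buffer += [bos_token] + doc
--         while len(buffer) >= seq_len:
--             out.append(buffer[:seq_len])
--             buffer = buffer[seq_len:]
--     return out
-- ===== Notes on version B (the rewrite author's own statement) =====
-- stated objective: alternative
-- what changed: Replaced A's two-phase build-the-whole-flat-list-then-slice-by-index with a single streaming pass that keeps a bounded sliding buffer and emits each full chunk as soon as it fills, never materialising the full concatenation.
import Mathlib
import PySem

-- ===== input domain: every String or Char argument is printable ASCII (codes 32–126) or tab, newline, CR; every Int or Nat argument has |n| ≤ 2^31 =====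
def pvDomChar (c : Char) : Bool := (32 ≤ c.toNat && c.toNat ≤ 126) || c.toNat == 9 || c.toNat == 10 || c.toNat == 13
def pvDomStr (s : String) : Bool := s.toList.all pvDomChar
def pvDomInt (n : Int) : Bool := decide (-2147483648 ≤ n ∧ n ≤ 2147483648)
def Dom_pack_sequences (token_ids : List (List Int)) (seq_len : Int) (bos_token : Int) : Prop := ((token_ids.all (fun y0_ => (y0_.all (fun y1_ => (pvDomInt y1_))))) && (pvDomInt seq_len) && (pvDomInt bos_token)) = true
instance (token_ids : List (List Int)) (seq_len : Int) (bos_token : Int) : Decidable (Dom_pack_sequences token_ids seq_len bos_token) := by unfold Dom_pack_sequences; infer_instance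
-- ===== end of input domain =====

-- B replaces A's build-whole-flat-list-then-slice with a one-pass sliding buffer
-- that emits each full chunk as it fills (objective: alternative decomposition).

-- ===== PORT A =====
def pack_sequences (token_ids : List (List Int)) (seq_len : Int) (bos_token : Int) : List (List Int) :=
  -- flat = []; for doc: flat.append(bos); flat.extend(doc)
  let flat : List Int := token_ids.foldl (fun acc doc => (acc ++ [bos_token]) ++ doc) []
  -- n_sequences = len(flat) // seq_len
  let n : Int := PySem.Int.floordiv (flat.length : Int) seq_len
  -- for i in range(n): sequences.append(flat[start : start+seq_len])
  (PySem.List.pyRange 0 n 1).foldl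
    (fun seqs i => seqs ++ [PySem.List.slice flat (some (i * seq_len)) (some (i * seq_len + seq_len))]) []

-- ===== PORT B =====
-- while len(buffer) >= seq_len: out.append(buffer[:seq_len]); buffer = buffer[seq_len:]
def pvFlush (s : Nat) (st : List (List Int) × List Int) : List (List Int) × List Int :=
  if h : 0 < s ∧ s ≤ st.2.length then
    pvFlush s (st.1 ++ [st.2.take s], st.2.drop s)
  else st
termination_by st.2.length
decreasing_by simp; omega

def pack_sequences_alt (token_ids : List (List Int)) (seq_len : Int) (bos_token : Int) : List (List Int) :=
  if seq_len ≤ 0 then [] else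
  let s := seq_len.toNat
  (token_ids.foldl (fun st doc => pvFlush s (st.1, st.2 ++ bos_token :: doc)) ([], [])).1

-- ===== PRECONDITION & SPEC =====
-- Pre_ excludes exactly seq_len = 0, where A raises ZeroDivisionError.
def Pre_pack_sequences (token_ids : List (List Int)) (seq_len : Int) (bos_token : Int) : Prop := seq_len ≠ 0
instance (token_ids : List (List Int)) (seq_len : Int) (bos_token : Int) : Decidable (Pre_pack_sequences token_ids seq_len bos_token) := by unfold Pre_pack_sequences; infer_instance

def pvWitness_pack_sequences : List (List Int) × Int × Int := ([[1, 2], [3]], 2, 0)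

def Spec_pack_sequences (token_ids : List (List Int)) (seq_len : Int) (bos_token : Int) (out : List (List Int)) : Prop := out = pack_sequences_alt token_ids seq_len bos_token
instance (token_ids : List (List Int)) (seq_len : Int) (bos_token : Int) (out : List (List Int)) : Decidable (Spec_pack_sequences token_ids seq_len bos_token out) := by unfold Spec_pack_sequences; infer_instance

-- ===== CLAIM (what is proved, stated in full; the proofs are below) =====
def Claim_equal_pack_sequences : Prop := ∀ (token_ids : List (List Int)) (seq_len : Int) (bos_token : Int), Dom_pack_sequences token_ids seq_len bos_token → Pre_pack_sequences token_ids seq_len bos_token → Spec_pack_sequences token_ids seq_len bos_token (pack_sequences token_ids seq_len bos_token)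


-- ===== LEMMAS AND PROOFS =====

-- the sequence of full s-chunks of a list (leftover discarded)
def pvChunks (s : Nat) (l : List Int) : List (List Int) :=
  if h : 0 < s ∧ s ≤ l.length then l.take s :: pvChunks s (l.drop s) else []
termination_by l.length
decreasing_by simp; omega

-- the leftover after removing full s-chunks
def pvRest (s : Nat) (l : List Int) : List Int :=
  if h : 0 < s ∧ s ≤ l.length then pvRest s (l.drop s) else l
termination_by l.length
decreasing_by simp; omega

lemma pvFlush_spec (s : Nat) : ∀ (n : Nat) (buf : List Int), buf.length ≤ n →
    ∀ out, pvFlush s (out, buf) = (out ++ pvChunks s buf, pvRest s buf) := by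
  intro n
  induction n with
  | zero =>
    intro buf hb out
    rw [pvFlush, pvChunks, pvRest]
    by_cases h : 0 < s ∧ s ≤ buf.length
    · omega
    · simp [h]
  | succ n ih =>
    intro buf hb out
    rw [pvFlush, pvChunks, pvRest]
    by_cases h : 0 < s ∧ s ≤ buf.length
    · simp only [h, dite_true, if_pos h]
      rw [ih (buf.drop s) (by simp; omega)]
      simp
    · simp [h]

lemma pvChunks_append (s : Nat) : ∀ (n : Nat) (buf : List Int), buf.length ≤ n →
    ∀ y, pvChunks s (buf ++ y) = pvChunks s buf ++ pvChunks s (pvRest s buf ++ y) := by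
  intro n
  induction n with
  | zero =>
    intro buf hb y
    by_cases h : 0 < s ∧ s ≤ buf.length
    · omega
    · conv_rhs => rw [pvChunks, pvRest]
      simp [h]
  | succ n ih =>
    intro buf hb y
    by_cases h : 0 < s ∧ s ≤ buf.length
    · have hsb : 0 < s ∧ s ≤ (buf ++ y).length := by
        constructor
        · exact h.1
        · simp; omega
      conv_lhs => rw [pvChunks]
      rw [dif_pos hsb]
      conv_rhs => rw [pvChunks, pvRest]
      rw [dif_pos h, dif_pos h]
      rw [List.take_append_of_le_length h.2, List.drop_append_of_le_length h.2]
      rw [ih (buf.drop s) (by simp; omega) y]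
      simp
    · conv_rhs => rw [pvChunks, pvRest]
      simp [h]

lemma pvRest_lt (s : Nat) (hs : 0 < s) : ∀ (n : Nat) (l : List Int), l.length ≤ n →
    (pvRest s l).length < s := by
  intro n
  induction n with
  | zero =>
    intro l hl
    rw [pvRest]
    by_cases h : 0 < s ∧ s ≤ l.length
    · omega
    · rw [dif_neg h]; omega
  | succ n ih =>
    intro l hl
    rw [pvRest]
    by_cases h : 0 < s ∧ s ≤ l.length
    · rw [dif_pos h]; exact ih (l.drop s) (by simp; omega)
    · rw [dif_neg h]; omega

lemma pvChunks_nil_of_lt (s : Nat) (l : List Int) (h : l.length < s) : pvChunks s l = [] := by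
  rw [pvChunks]
  rw [dif_neg (by omega)]

lemma pvFold_spec (s : Nat) (hs : 0 < s) (bos : Int) :
    ∀ (docs : List (List Int)) (out : List (List Int)) (buf : List Int), buf.length < s →
    (docs.foldl (fun st doc => pvFlush s (st.1, st.2 ++ bos :: doc)) (out, buf)).1
      = out ++ pvChunks s (buf ++ (docs.map (fun d => bos :: d)).flatten) := by
  intro docs
  induction docs with
  | nil =>
    intro out buf hbuf
    simp [pvChunks_nil_of_lt s buf hbuf]
  | cons d ds ih =>
    intro out buf hbuf
    simp only [List.foldl_cons]
    rw [pvFlush_spec s (buf ++ bos :: d).length (buf ++ bos :: d) le_rfl out]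
    rw [ih _ _ (pvRest_lt s hs (buf ++ bos :: d).length _ le_rfl)]
    rw [List.append_assoc, ← pvChunks_append s (buf ++ bos :: d).length (buf ++ bos :: d) le_rfl]
    simp

-- A's flat-building foldl is a flatten of bos-prefixed docs
lemma pvFlat_spec (bos : Int) : ∀ (docs : List (List Int)) (acc : List Int),
    docs.foldl (fun acc doc => (acc ++ [bos]) ++ doc) acc
      = acc ++ (docs.map (fun d => bos :: d)).flatten := by
  intro docs
  induction docs with
  | nil => intro acc; simp
  | cons d ds ih => intro acc; simp [ih]

-- pvChunks as an indexed map over range (for A's slicing loop)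
lemma pvChunks_eq_map_range (s : Nat) (hs : 0 < s) : ∀ (n : Nat) (l : List Int), l.length ≤ n →
    pvChunks s l = (List.range (l.length / s)).map (fun k => (l.drop (k * s)).take s) := by
  intro n
  induction n with
  | zero =>
    intro l hl
    rw [pvChunks]
    have h0 : l.length = 0 := by omega
    have : l.length / s = 0 := by rw [h0]; simp
    rw [this]
    simp
    omega
  | succ n ih =>
    intro l hl
    rw [pvChunks]
    by_cases h : 0 < s ∧ s ≤ l.length
    · rw [dif_pos h]
      have hdiv : l.length / s = (l.length - s) / s + 1 := by
        rw [Nat.div_eq_sub_div hs h.2]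
      rw [hdiv, List.range_succ_eq_map, List.map_cons, List.map_map]
      have hlen : (l.drop s).length = l.length - s := by simp
      rw [ih (l.drop s) (by omega)]
      rw [hlen]
      congr 1
      · simp
      · apply List.map_congr_left
        intro k _
        simp only [Function.comp]
        rw [List.drop_drop, Nat.succ_eq_add_one]
        congr 2
        ring
    · rw [dif_neg h]
      have : l.length < s := by omega
      rw [Nat.div_eq_of_lt this]
      simp

lemma pvFoldPush (f : Int → List Int) (xs : List Int) : ∀ acc,
    xs.foldl (fun acc i => acc ++ [f i]) acc = acc ++ xs.map f := by
  induction xs with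
  | nil => intro acc; simp
  | cons x xs ih => intro acc; simp [ih]

lemma pvA_pos (token_ids : List (List Int)) (seq_len : Int) (bos_token : Int)
    (hpos : 0 < seq_len) :
    pack_sequences token_ids seq_len bos_token
      = pvChunks seq_len.toNat ((token_ids.map (fun d => bos_token :: d)).flatten) := by
  unfold pack_sequences
  dsimp only
  rw [pvFlat_spec]
  simp only [List.nil_append]
  set flat := (token_ids.map (fun d => bos_token :: d)).flatten with hflat
  set s := seq_len.toNat with hs
  have hsl : seq_len = (s : Int) := by omega
  have hspos : 0 < s := by omega
  rw [hsl]
  rw [PySem.Int.floordiv_natCast flat.length s]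
  rw [PySem.List.pyRange_zero_natCast]
  rw [pvFoldPush]
  rw [pvChunks_eq_map_range s hspos flat.length flat le_rfl]
  simp only [List.nil_append, List.map_map]
  apply List.map_congr_left
  intro k _
  simp only [Function.comp]
  have h1 : (k : Int) * (s : Int) + (s : Int) = ((k * s + s : Nat) : Int) := by push_cast; ring
  have h2 : (k : Int) * (s : Int) = ((k * s : Nat) : Int) := by push_cast; ring
  rw [h1, h2]
  rw [PySem.List.slice_natCast]
  congr 1
  omega

lemma pvA_neg (token_ids : List (List Int)) (seq_len : Int) (bos_token : Int)
    (hneg : seq_len < 0) :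
    pack_sequences token_ids seq_len bos_token = [] := by
  unfold pack_sequences
  dsimp only
  have hn : PySem.Int.floordiv ((token_ids.foldl (fun acc doc => (acc ++ [bos_token]) ++ doc) []).length : Int) seq_len ≤ 0 := by
    apply Int.fdiv_nonpos_of_nonneg_of_nonpos
    · positivity
    · omega
  rw [PySem.List.pyRange_one_eq_nil hn]
  simp

-- ===== VERDICT (by name: the statement is the Claim_ definition above) =====
theorem pack_sequences_spec : Claim_equal_pack_sequences := by
  intro token_ids seq_len bos_token _ hpre
  unfold Spec_pack_sequences pack_sequences_alt
  rcases lt_trichotomy seq_len 0 with h | h | h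
  · rw [if_pos (by omega), pvA_neg token_ids seq_len bos_token h]
  · exact absurd h hpre
  · rw [if_neg (by omega)]
    rw [pvFold_spec seq_len.toNat (by omega) bos_token _ _ _ (by simp; omega)]
    rw [pvA_pos token_ids seq_len bos_token h]
    simp
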